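-- pv_equiv track=rewrite | github.com/Teslanator20/wynnextras_discordbot | bot.py | get_tier_info
-- ===== SOURCE A (Python) =====
-- TIER_THRESHOLDS = {
--     "mythic": [1, 5, 15],      # Tier I, II, III (max)
--     "fabled": [1, 15, 75],     # Tier I, II, III (max)
--     "legendary": [1, 5, 30, 150],  # Tier I, II, III, IV (max)
-- }
--
-- def get_tier_info(rarity: str, amount: int) -> tuple[int, int, int]:
--     """
--     Get tier info for an aspect based on rarity and amount owned.
--     Returns (current_tier, target_tier, remaining_in_tier)
--     """
--     rarity_lower = rarity.lower()
--     thresholds = TIER_THRESHOLDS.get(rarity_lower, [1, 15, 75])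
--     max_amount = thresholds[-1]
--
--     if amount >= max_amount:
--         return (0, 0, 0)  # Maxed
--
--     # Find current tier and remaining
--     current_tier = 1
--     for i, threshold in enumerate(thresholds):
--         if amount < threshold:
--             break
--         current_tier = i + 1
--
--     # Calculate remaining in current tier progression
--     if current_tier < len(thresholds):
--         target_tier = current_tier + 1
--         tier_start = thresholds[current_tier - 1] if current_tier > 0 else 0
--         tier_end = thresholds[current_tier]
--         remaining = tier_end - amount
--     else:
--         # Working on final tier
--         target_tier = current_tier
--         tier_start = thresholds[current_tier - 1] if current_tier > 1 else 0
--         tier_end = thresholds[current_tier - 1]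
--         remaining = max_amount - amount
--
--     return (current_tier, target_tier, remaining)
-- ===== SOURCE B (Python) =====
-- TIER_THRESHOLDS = {
--     "mythic": [1, 5, 15],
--     "fabled": [1, 15, 75],
--     "legendary": [1, 5, 30, 150],
-- }
--
-- def get_tier_info(rarity: str, amount: int) -> tuple[int, int, int]:
--     """Binary search (bisect_right by hand) for the tier instead of a linear scan."""
--     thresholds = TIER_THRESHOLDS.get(rarity.lower(), [1, 15, 75])
--     if amount >= thresholds[-1]:
--         return (0, 0, 0)  # Maxed
--     lo, hi = 0, len(thresholds)
--     while lo < hi: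
--         mid = (lo + hi) // 2
--         if amount < thresholds[mid]:
--             hi = mid
--         else:
--             lo = mid + 1
--     current_tier = max(1, lo)
--     return (current_tier, current_tier + 1, thresholds[current_tier] - amount)
-- ===== Notes on version B (the rewrite author's own statement) =====
-- stated objective: alternative
-- what changed: Replaces the linear enumerate-and-break scan plus the dead final-tier else branch by a hand-written bisect_right binary search with a tier-1 clamp and a single return expression.
import Mathlib
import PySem

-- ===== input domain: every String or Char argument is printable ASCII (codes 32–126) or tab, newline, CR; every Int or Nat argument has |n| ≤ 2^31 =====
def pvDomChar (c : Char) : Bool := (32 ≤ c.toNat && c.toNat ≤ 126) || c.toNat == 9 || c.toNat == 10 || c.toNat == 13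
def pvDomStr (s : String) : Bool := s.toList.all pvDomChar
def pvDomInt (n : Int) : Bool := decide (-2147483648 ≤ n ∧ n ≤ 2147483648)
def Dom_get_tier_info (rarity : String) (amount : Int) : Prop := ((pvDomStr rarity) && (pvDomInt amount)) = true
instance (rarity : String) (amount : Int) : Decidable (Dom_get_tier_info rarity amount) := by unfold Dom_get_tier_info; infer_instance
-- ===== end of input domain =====

-- ===== PORT A =====
def TIER_THRESHOLDS : PySem.Dict String (List Int) :=
  PySem.Dict.mk [("mythic", [1, 5, 15]), ("fabled", [1, 15, 75]), ("legendary", [1, 5, 30, 150])]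

-- A's for-loop with break: if amount < threshold, stop; else current_tier := i+1
def pvFindTier : List Int → Int → Int → Int → Int
  | [], _, _, ct => ct
  | t :: rest, amount, i, ct =>
      if amount < t then ct else pvFindTier rest amount (i + 1) (i + 1)

def get_tier_info (rarity : String) (amount : Int) : Int × Int × Int :=
  let rarity_lower := PySem.Str.lower rarity
  let thresholds := PySem.Dict.getD TIER_THRESHOLDS rarity_lower [1, 15, 75]
  let max_amount := (PySem.List.pyGet? thresholds (-1)).getD 0  -- thresholds is never empty, so the default is dead
  if amount ≥ max_amount then (0, 0, 0)
  else
    let current_tier := pvFindTier thresholds amount 0 1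
    if current_tier < (thresholds.length : Int) then
      let target_tier := current_tier + 1
      let tier_end := (PySem.List.pyGet? thresholds current_tier).getD 0  -- index is in range here
      (current_tier, target_tier, tier_end - amount)
    else
      (current_tier, current_tier, max_amount - amount)

-- ===== PORT B =====
-- bisect_right by hand: binary search on the sorted threshold list
def pvBisect (a : List Int) (x : Int) (lo hi : Nat) : Nat :=
  if _h : lo < hi then
    let mid := (lo + hi) / 2
    if x < a.getD mid 0 then pvBisect a x lo mid else pvBisect a x (mid + 1) hi
  else lo
termination_by hi - lo
decreasing_by all_goals omega

def get_tier_info_alt (rarity : String) (amount : Int) : Int × Int × Int :=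
  let thresholds := PySem.Dict.getD TIER_THRESHOLDS (PySem.Str.lower rarity) [1, 15, 75]
  if amount ≥ (PySem.List.pyGet? thresholds (-1)).getD 0 then (0, 0, 0)
  else
    let current_tier : Int := max 1 (pvBisect thresholds amount 0 thresholds.length : Int)
    (current_tier, current_tier + 1, (PySem.List.pyGet? thresholds current_tier).getD 0 - amount)

-- ===== PRECONDITION & SPEC =====
def Spec_get_tier_info (rarity : String) (amount : Int) (out : Int × Int × Int) : Prop := out = get_tier_info_alt rarity amount
instance (rarity : String) (amount : Int) (out : Int × Int × Int) : Decidable (Spec_get_tier_info rarity amount out) := by unfold Spec_get_tier_info; infer_instance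

-- ===== CLAIM (what is proved, stated in full; the proofs are below) =====
def Claim_equal_get_tier_info : Prop := ∀ (rarity : String) (amount : Int), Dom_get_tier_info rarity amount → Spec_get_tier_info rarity amount (get_tier_info rarity amount)

-- ===== LEMMAS AND PROOFS =====
theorem pvBisect_mythic (x : Int) :
    pvBisect [1, 5, 15] x 0 3 =
      if x < 5 then (if x < 1 then 0 else 1) else if x < 15 then 2 else 3 := by
  simp [pvBisect]

theorem pvBisect_fabled (x : Int) :
    pvBisect [1, 15, 75] x 0 3 =
      if x < 15 then (if x < 1 then 0 else 1) else if x < 75 then 2 else 3 := by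
  simp [pvBisect]

theorem pvBisect_legendary (x : Int) :
    pvBisect [1, 5, 30, 150] x 0 4 =
      if x < 30 then (if x < 5 then (if x < 1 then 0 else 1) else 2)
      else if x < 150 then 3 else 4 := by
  simp [pvBisect]

theorem pv_dict_cases (k : String) :
    PySem.Dict.getD TIER_THRESHOLDS k [1, 15, 75] = [1, 5, 15] ∨
    PySem.Dict.getD TIER_THRESHOLDS k [1, 15, 75] = [1, 15, 75] ∨
    PySem.Dict.getD TIER_THRESHOLDS k [1, 15, 75] = [1, 5, 30, 150] := by
  simp only [TIER_THRESHOLDS, PySem.Dict.getD_eq_get?_getD, PySem.Dict.get?_mk_cons]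
  by_cases h1 : ("mythic" == k) <;> by_cases h2 : ("fabled" == k) <;>
    by_cases h3 : ("legendary" == k) <;> simp [h1, h2, h3, PySem.Dict.get?]

-- ===== VERDICT (by name: the statement is the Claim_ definition above) =====
theorem get_tier_info_spec : Claim_equal_get_tier_info := by
  intro rarity amount _
  unfold Spec_get_tier_info
  rcases pv_dict_cases (PySem.Str.lower rarity) with h | h | h
  · simp only [get_tier_info, get_tier_info_alt, h]
    norm_num [pvFindTier, pvBisect_mythic]
    split_ifs <;> simp_all [PySem.List.pyGet?, PySem.List.pyIdx?, Prod.ext_iff] <;> omega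
  · simp only [get_tier_info, get_tier_info_alt, h]
    norm_num [pvFindTier, pvBisect_fabled]
    split_ifs <;> simp_all [PySem.List.pyGet?, PySem.List.pyIdx?, Prod.ext_iff] <;> omega
  · simp only [get_tier_info, get_tier_info_alt, h]
    norm_num [pvFindTier, pvBisect_legendary]
    split_ifs <;> simp_all [PySem.List.pyGet?, PySem.List.pyIdx?, Prod.ext_iff] <;> omega
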